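-- pv_equiv track=rewrite | github.com/EyeTrackVR/ETVR-Backend | eyetrackvr_backend/utils/misc_utils.py | mask_to_cpu_list
-- ===== SOURCE A (Python) =====
-- def mask_to_cpu_list(cpu_mask: str) -> list[int]:
--     """Converts a hex mask to a list of cpu ids"""
--     cpu_list: list[int] = []
--     if cpu_mask != "":
--         mask = int(cpu_mask, 16)
--
--         bit_position = 0
--         while mask > 0:
--             if mask & 1:
--                 cpu_list.append(bit_position)
--             mask >>= 1
--             bit_position += 1
--
--     return cpu_list
-- ===== SOURCE B (Python) =====
-- def mask_to_cpu_list(cpu_mask: str) -> list[int]: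
--     """Converts a hex mask to a list of cpu ids"""
--     if cpu_mask == "":
--         return []
--     mask = int(cpu_mask, 16)
--     if mask <= 0:
--         return []
--     return [i for i, ch in enumerate(reversed(bin(mask)[2:])) if ch == '1']
-- ===== Notes on version B (the rewrite author's own statement) =====
-- stated objective: simpler
-- what changed: Replaces the shift-and-count while loop with a comprehension over the enumerated reversed binary string of the parsed mask, guarded by mask > 0.
import Mathlib
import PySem

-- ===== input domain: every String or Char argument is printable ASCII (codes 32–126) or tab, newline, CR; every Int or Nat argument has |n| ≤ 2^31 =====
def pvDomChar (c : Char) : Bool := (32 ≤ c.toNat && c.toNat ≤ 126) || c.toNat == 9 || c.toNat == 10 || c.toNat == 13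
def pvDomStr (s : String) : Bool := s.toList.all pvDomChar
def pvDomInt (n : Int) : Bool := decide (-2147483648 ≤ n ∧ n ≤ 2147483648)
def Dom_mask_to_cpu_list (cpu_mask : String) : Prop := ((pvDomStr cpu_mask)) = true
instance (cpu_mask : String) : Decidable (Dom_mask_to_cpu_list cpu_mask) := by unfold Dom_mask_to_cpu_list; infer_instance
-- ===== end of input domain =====

-- B replaces A's shift-and-count while loop by a comprehension over the enumerated
-- reversed binary string of the parsed mask (objective: simpler).

-- ===== PORT A =====
-- A's while loop: `mask & 1` / `mask >>= 1` are ported as `mask % 2` / `mask / 2`,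
-- exact here since the loop body only runs under the guard mask > 0.
def pvALoop (mask bit : Int) (acc : List Int) : List Int :=
  if mask > 0 then
    pvALoop (mask / 2) (bit + 1) (if mask % 2 == 1 then acc ++ [bit] else acc)
  else acc
termination_by mask.toNat
decreasing_by omega

def mask_to_cpu_list (cpu_mask : String) : List Int :=
  if cpu_mask ≠ "" then
    match PySem.Int.ofStrBase? cpu_mask 16 with
    | none => []   -- int(cpu_mask, 16) raises ValueError here; excluded by Pre_
    | some mask => pvALoop mask 0 []
  else []

-- ===== PORT B =====
-- bin(mask)[2:] for mask > 0: binary digits of mask, most significant first.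
def pvBin (m : Int) : List Char :=
  if m > 0 then pvBin (m / 2) ++ [if m % 2 == 1 then '1' else '0'] else []
termination_by m.toNat
decreasing_by omega

def mask_to_cpu_list_alt (cpu_mask : String) : List Int :=
  if cpu_mask == "" then []
  else
    match PySem.Int.ofStrBase? cpu_mask 16 with
    | none => []   -- int(cpu_mask, 16) raises ValueError here; excluded by Pre_
    | some mask =>
      if mask ≤ 0 then []
      else ((PySem.List.enumerate ((pvBin mask).reverse) 0).filter
              (fun p => p.2 == '1')).map (fun p => p.1)

-- ===== PRECONDITION & SPEC =====
-- Pre_ excludes exactly the inputs on which int(cpu_mask, 16) raises ValueError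
-- (both A and B raise there).
def Pre_mask_to_cpu_list (cpu_mask : String) : Prop :=
  cpu_mask = "" ∨ (PySem.Int.ofStrBase? cpu_mask 16).isSome = true
instance (cpu_mask : String) : Decidable (Pre_mask_to_cpu_list cpu_mask) := by
  unfold Pre_mask_to_cpu_list; infer_instance

def pvWitness_mask_to_cpu_list : String := "a3"

def Spec_mask_to_cpu_list (cpu_mask : String) (out : List Int) : Prop := out = mask_to_cpu_list_alt cpu_mask
instance (cpu_mask : String) (out : List Int) : Decidable (Spec_mask_to_cpu_list cpu_mask out) := by unfold Spec_mask_to_cpu_list; infer_instance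

-- ===== CLAIM (what is proved, stated in full; the proofs are below) =====
def Claim_equal_mask_to_cpu_list : Prop := ∀ (cpu_mask : String), Dom_mask_to_cpu_list cpu_mask → Pre_mask_to_cpu_list cpu_mask → Spec_mask_to_cpu_list cpu_mask (mask_to_cpu_list cpu_mask)

-- ===== LEMMAS AND PROOFS =====

-- The set-bit positions that B extracts from the reversed binary digits of m,
-- starting at index `bit`, are exactly what A's loop appends.
theorem pvALoop_eq (m bit : Int) (acc : List Int) :
    pvALoop m bit acc
      = acc ++ ((PySem.List.enumerate ((pvBin m).reverse) bit).filter
                  (fun p => p.2 == '1')).map (fun p => p.1) := by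
  rw [pvALoop, pvBin]
  by_cases h : m > 0
  · simp only [h, if_pos]
    rw [pvALoop_eq (m / 2) (bit + 1)]
    simp only [List.reverse_append, List.reverse_singleton, List.singleton_append,
      PySem.List.enumerate_cons, List.filter_cons]
    by_cases hb : m % 2 == 1
    · simp [hb]
    · simp [hb]
  · simp [h, PySem.List.enumerate_nil]
termination_by m.toNat
decreasing_by omega

-- pvBin of a nonpositive mask is empty.
theorem pvBin_nonpos (m : Int) (h : ¬ m > 0) : pvBin m = [] := by
  rw [pvBin]; simp [h]

-- ===== VERDICT (by name: the statement is the Claim_ definition above) =====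
theorem mask_to_cpu_list_spec : Claim_equal_mask_to_cpu_list := by
  intro s _ hpre
  unfold Spec_mask_to_cpu_list mask_to_cpu_list mask_to_cpu_list_alt
  by_cases hs : s = ""
  · simp [hs]
  · simp only [hs, ne_eq, not_false_iff, if_true, beq_iff_eq]
    cases ho : PySem.Int.ofStrBase? s 16 with
    | none =>
        rcases hpre with h | h
        · exact absurd h hs
        · rw [ho] at h; simp at h
    | some m =>
        by_cases hm : m ≤ 0
        · have hng : ¬ m > 0 := by omega
          simp [pvALoop_eq, hm, pvBin_nonpos m hng, PySem.List.enumerate_nil]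
        · simp [pvALoop_eq, hm]
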